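-- pv_equiv track=rewrite | github.com/NeilWangziyu/JZOffer | NK_1.py | height_tree
-- ===== SOURCE A (Python) =====
-- def havechild(node_list, td):
--     for node in node_list:
--         if node in td:
--             if len(td[node]) > 0:
--                 return True
--     return False
--
-- def height_tree(m):
--     tree_dict = {}
--     for i in m:
--         if i[0] not in tree_dict:
--             tree_dict[i[0]] = [i[1]]
--         else:
--             if len(tree_dict[i[0]]) < 2:
--                 tree_dict[i[0]].append(i[1])
--     tree_stack = [[0]]
--     while havechild(tree_stack[-1], tree_dict):
--         new_layer = []
--         for node in tree_stack[-1]: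
--             if node in tree_dict:
--                 new_layer.extend(tree_dict[node])
--         tree_stack.append(new_layer)
--     return len(tree_stack)
-- ===== SOURCE B (Python) =====
-- def height_tree(m):
--     tree_dict = {}
--     for i in m:
--         if i[0] not in tree_dict:
--             tree_dict[i[0]] = [i[1]]
--         else:
--             if len(tree_dict[i[0]]) < 2:
--                 tree_dict[i[0]].append(i[1])
--     stack = [(0, 1)]
--     max_depth = 0
--     while stack:
--         node, depth = stack.pop()
--         if depth > max_depth:
--             max_depth = depth
--         for child in tree_dict.get(node, []):
--             stack.append((child, depth + 1))
--     return max_depth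
-- ===== Notes on version B (the rewrite author's own statement) =====
-- stated objective: alternative
-- what changed: The level-order BFS (materialized layer stack plus a havechild scan over the last layer) is replaced by an iterative depth-first search with an explicit stack of (node, depth) pairs that tracks the maximum depth reached; the dict construction is kept identical.
import Mathlib
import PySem

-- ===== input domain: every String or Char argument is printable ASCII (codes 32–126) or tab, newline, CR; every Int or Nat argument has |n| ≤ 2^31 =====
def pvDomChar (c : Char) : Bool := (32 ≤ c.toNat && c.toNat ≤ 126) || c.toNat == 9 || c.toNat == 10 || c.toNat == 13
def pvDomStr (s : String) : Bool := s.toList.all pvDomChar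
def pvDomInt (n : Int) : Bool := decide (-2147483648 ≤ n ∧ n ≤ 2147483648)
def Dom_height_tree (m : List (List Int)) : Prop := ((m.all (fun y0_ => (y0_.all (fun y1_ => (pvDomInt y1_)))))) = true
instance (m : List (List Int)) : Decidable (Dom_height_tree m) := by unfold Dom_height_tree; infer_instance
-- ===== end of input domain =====

-- B replaces A's level-order BFS (materialized layer stack + havechild scan) with an explicit-stack
-- depth-first search tracking the maximum depth; the dict construction is kept identical (objective: alternative).

-- ===== PORT A =====
-- loop body of A's dict-building for-loop (pyGet? none = IndexError, excluded by Pre_)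
def buildStep (td : PySem.Dict Int (List Int)) (i : List Int) : PySem.Dict Int (List Int) :=
  match PySem.List.pyGet? i 0 with
  | none => td
  | some a =>
    if (PySem.Dict.get? td a).isNone then
      match PySem.List.pyGet? i 1 with
      | none => td
      | some b => PySem.Dict.insert td a [b]
    else if (PySem.Dict.getD td a []).length < 2 then
      match PySem.List.pyGet? i 1 with
      | none => td
      | some b => PySem.Dict.modify td a [] (fun l => l ++ [b])
    else td

def buildTreeDict (m : List (List Int)) : PySem.Dict Int (List Int) :=
  m.foldl buildStep PySem.Dict.empty

def havechild (node_list : List Int) (td : PySem.Dict Int (List Int)) : Bool :=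
  node_list.any (fun node =>
    match PySem.Dict.get? td node with
    | some l => decide (0 < l.length)
    | none => false)

-- A's while-loop; the fuel m.length + 2 is shown sufficient under Pre_ (the loop runs < m.length + 2 times)
def bfsLoop (td : PySem.Dict Int (List Int)) : Nat → List (List Int) → List (List Int)
  | 0, st => st
  | fuel + 1, st =>
    let cur := st.getLastD []
    if havechild cur td then
      bfsLoop td fuel (st ++ [cur.foldl (fun nl node =>
        if (PySem.Dict.get? td node).isSome then nl ++ PySem.Dict.getD td node [] else nl) []])
    else st

def height_tree (m : List (List Int)) : Int :=
  ((bfsLoop (buildTreeDict m) (m.length + 2) [[0]]).length : Int)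

-- ===== PORT B =====
-- B's while-loop (stack top at the head); fuel 4 ^ (m.length + 2) is shown sufficient under Pre_
def dfsLoop (td : PySem.Dict Int (List Int)) : Nat → List (Int × Int) → Int → Int
  | 0, _, maxDepth => maxDepth
  | _ + 1, [], maxDepth => maxDepth
  | fuel + 1, (node, depth) :: rest, maxDepth =>
    dfsLoop td fuel
      ((PySem.Dict.getD td node []).foldl (fun st c => (c, depth + 1) :: st) rest)
      (if depth > maxDepth then depth else maxDepth)

def height_tree_alt (m : List (List Int)) : Int :=
  dfsLoop (buildTreeDict m) (4 ^ (m.length + 2)) [(0, 1)] 0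

-- ===== PRECONDITION & SPEC =====
-- kids m a: the capped child list the dict ends up holding for key a (first two second-entries of rows starting with a)
def kids (m : List (List Int)) (a : Int) : List Int :=
  (m.filterMap (fun r =>
    match r with
    | x :: y :: _ => if x = a then some y else none
    | _ => none)).take 2

-- bndM m g n: every walk from n in the capped child graph has at most g edges
def bndM (m : List (List Int)) : Nat → Int → Bool
  | 0, n => decide (kids m n = [])
  | g + 1, n => (kids m n).all (fun c => bndM m g c)

-- rowsFine pre rows: processing rows (after prefix pre) never touches i[1] on a row shorter than 2
def rowsFine : List (List Int) → List (List Int) → Bool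
  | _, [] => true
  | pre, r :: rest =>
    (decide (2 ≤ r.length) ||
      (decide (r.length = 1) && decide (2 ≤ (kids pre (r.getD 0 0)).length))) &&
    rowsFine (pre ++ [r]) rest

-- Pre_ excludes exactly the inputs where A raises IndexError (a too-short row reached while its key
-- still has fewer than two children) or loops forever (a cycle reachable from 0 in the capped child
-- graph, i.e. a walk from 0 longer than m.length).
def Pre_height_tree (m : List (List Int)) : Prop :=
  rowsFine [] m = true ∧ bndM m m.length 0 = true
instance (m : List (List Int)) : Decidable (Pre_height_tree m) := by unfold Pre_height_tree; infer_instance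

def pvWitness_height_tree : List (List Int) := [[0, 1], [0, 2], [1, 3]]

def Spec_height_tree (m : List (List Int)) (out : Int) : Prop := out = height_tree_alt m
instance (m : List (List Int)) (out : Int) : Decidable (Spec_height_tree m out) := by unfold Spec_height_tree; infer_instance

-- ===== CLAIM (what is proved, stated in full; the proofs are below) =====
def Claim_equal_height_tree : Prop := ∀ (m : List (List Int)), Dom_height_tree m → Pre_height_tree m → Spec_height_tree m (height_tree m)

-- ===== LEMMAS AND PROOFS =====

-- nd m g n: fuel-bounded depth of the capped child tree below n (stable once g bounds the walks from n)
def nd (m : List (List Int)) : Nat → Int → Nat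
  | 0, _ => 1
  | g + 1, a => 1 + ((kids m a).map (nd m g)).foldl max 0

theorem nd_pos (m : List (List Int)) (g : Nat) (a : Int) : 1 ≤ nd m g a := by
  cases g with
  | zero => simp [nd]
  | succ g => simp [nd]

theorem foldl_max_le {α : Type} [LinearOrder α] (l : List α) (a b : α)
    (ha : a ≤ b) (h : ∀ x ∈ l, x ≤ b) : l.foldl max a ≤ b := by
  induction l generalizing a with
  | nil => exact ha
  | cons x t ih =>
    exact ih _ (max_le ha (h x (by simp))) (fun y hy => h y (by simp [hy]))

theorem foldl_max_pull {α : Type} [LinearOrder α] (l : List α) (a b : α) :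
    l.foldl max (a ⊔ b) = a ⊔ l.foldl max b := by
  induction l generalizing b with
  | nil => rfl
  | cons x t ih => simpa [max_assoc] using ih (b ⊔ x)

theorem foldl_max_reverse {α : Type} [LinearOrder α] (l : List α) (a : α) :
    l.reverse.foldl max a = l.foldl max a := by
  induction l generalizing a with
  | nil => rfl
  | cons x t ih =>
    have : t.foldl max a ⊔ x = t.foldl max (a ⊔ x) := by
      rw [max_comm a x, foldl_max_pull]; exact max_comm _ _
    simp [List.foldl_append, ih, this]

theorem bndM_mono (m : List (List Int)) (g : Nat) (a : Int)
    (h : bndM m g a = true) : bndM m (g + 1) a = true := by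
  induction g generalizing a with
  | zero =>
    simp only [bndM] at h
    simp only [bndM, List.all_eq_true]
    intro c hc
    simp at h
    simp [h] at hc
  | succ g ih =>
    simp only [bndM, List.all_eq_true] at h ⊢
    intro c hc
    have := ih c (h c hc)
    simpa [bndM, List.all_eq_true] using this

theorem bndM_child (m : List (List Int)) (g : Nat) (a c : Int)
    (h : bndM m g a = true) (hc : c ∈ kids m a) : bndM m g c = true := by
  cases g with
  | zero => simp [bndM] at h; simp [h] at hc
  | succ g =>
    simp only [bndM, List.all_eq_true] at h
    exact bndM_mono m g c (h c hc)

theorem nd_stable (m : List (List Int)) (g : Nat) (a : Int)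
    (h : bndM m g a = true) : nd m (g + 1) a = nd m g a := by
  induction g generalizing a with
  | zero => simp [bndM] at h; simp [nd, h]
  | succ g ih =>
    simp only [bndM, List.all_eq_true] at h
    simp only [nd]
    congr 1
    apply congrArg
    exact List.map_congr_left (fun c hc => ih c (h c hc))

-- under bndM, nd satisfies the one-step unfolding at the SAME fuel
theorem nd_succ_kids (m : List (List Int)) (g : Nat) (a : Int)
    (h : bndM m g a = true) :
    nd m g a = 1 + ((kids m a).map (nd m g)).foldl max 0 := by
  cases g with
  | zero => simp [bndM] at h; simp [nd, h]
  | succ g =>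
    simp only [bndM, List.all_eq_true] at h
    simp only [nd]
    congr 1
    apply congrArg
    exact (List.map_congr_left (fun c hc => nd_stable m g c (h c hc))).symm

theorem nd_le (m : List (List Int)) (g : Nat) (a : Int)
    (h : bndM m g a = true) : nd m g a ≤ g + 1 := by
  induction g generalizing a with
  | zero => simp [nd]
  | succ g ih =>
    simp only [bndM, List.all_eq_true] at h
    simp only [nd]
    have : ((kids m a).map (nd m g)).foldl max 0 ≤ g + 1 := by
      apply foldl_max_le
      · omega
      · intro x hx
        rcases List.mem_map.1 hx with ⟨c, hc, rfl⟩
        exact ih c (h c hc)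
    omega

theorem nd_of_kids_nil (m : List (List Int)) (g : Nat) (a : Int)
    (h : kids m a = []) : nd m g a = 1 := by
  cases g with
  | zero => rfl
  | succ g => simp [nd, h]

-- ===== the dict actually built: getD gives kids, containment means kids ≠ [] =====

theorem build_inv (m : List (List Int)) :
    ∀ (rows : List (List Int)) (td : PySem.Dict Int (List Int)),
      (∀ a, td.contains a = true → td.getD a [] ≠ []) →
      (∀ a, (td.getD a []).length ≤ 2) →
      ∀ a, (rows.foldl buildStep td).getD a []
            = (td.getD a [] ++ (rows.filterMap (fun r =>
                match r with
                | x :: y :: _ => if x = a then some y else none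
                | _ => none))).take 2
          ∧ ((rows.foldl buildStep td).contains a = true ↔
              (td.contains a = true ∨ (rows.filterMap (fun r =>
                match r with
                | x :: y :: _ => if x = a then some y else none
                | _ => none)) ≠ [])) := by
  intro rows
  induction rows with
  | nil =>
    intro td h1 h2 a
    refine ⟨?_, by simp⟩
    simp [List.take_of_length_le (h2 a)]
  | cons r rows ih =>
    intro td h1 h2 a
    match r with
    | [] =>
      have hstep : buildStep td [] = td := by simp [buildStep, pysem]
      simpa [hstep] using ih td h1 h2 a
    | [x] =>
      have hstep : buildStep td [x] = td := by
        unfold buildStep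
        have h0 : PySem.List.pyGet? ([x]) 0 = some x := by simp [pysem]
        have hn : PySem.List.pyGet? ([x]) 1 = none := by simp [pysem]
        rw [h0]
        dsimp only
        split_ifs <;> simp [hn]
      simpa [hstep] using ih td h1 h2 a
    | x :: y :: t =>
      have h0 : PySem.List.pyGet? (x :: y :: t) 0 = some x := by simp [pysem]
      have hy : PySem.List.pyGet? (x :: y :: t) 1 = some y := by simp [pysem]
      by_cases hnone : (td.get? x).isNone
      · -- new key: insert x [y]
        have hstep : buildStep td (x :: y :: t) = td.insert x [y] := by
          unfold buildStep
          rw [h0]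
          dsimp only
          rw [if_pos hnone, hy]
        have hgx : td.getD x [] = [] :=
          PySem.Dict.getD_of_get?_eq_none td [] (Option.isNone_iff_eq_none.1 hnone)
        have hcx : td.contains x = false := by
          rw [← PySem.Dict.get?_eq_none_iff_contains]
          exact Option.isNone_iff_eq_none.1 hnone
        have h1' : ∀ b, (td.insert x [y]).contains b = true → (td.insert x [y]).getD b [] ≠ [] := by
          intro b hb
          rw [PySem.Dict.getD_insert]
          split_ifs with he
          · simp
          · rw [PySem.Dict.contains_insert] at hb
            simp [he] at hb
            exact h1 b hb
        have h2' : ∀ b, ((td.insert x [y]).getD b []).length ≤ 2 := by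
          intro b
          rw [PySem.Dict.getD_insert]
          split_ifs with he
          · simp
          · exact h2 b
        have hih := ih (td.insert x [y]) h1' h2' a
        rw [List.foldl_cons, hstep]
        refine ⟨?_, ?_⟩
        · rw [hih.1, PySem.Dict.getD_insert, List.filterMap_cons]
          by_cases he : a = x
          · subst he
            simp [hgx]
          · simp [he, Ne.symm he]
        · rw [hih.2, PySem.Dict.contains_insert, List.filterMap_cons]
          by_cases he : a = x
          · subst he
            simp
          · simp [he, Ne.symm he]
      · have hcx : td.contains x = true := by
          by_contra hc
          have := (PySem.Dict.get?_eq_none_iff_contains td x).2 (by simpa using hc)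
          simp [this] at hnone
        by_cases hlt : (td.getD x []).length < 2
        · -- key present with one child: append y
          have hstep : buildStep td (x :: y :: t)
              = td.modify x [] (fun l => l ++ [y]) := by
            unfold buildStep
            rw [h0]
            dsimp only
            rw [if_neg hnone, if_pos hlt, hy]
          have h1' : ∀ b, (td.modify x [] (fun l => l ++ [y])).contains b = true →
              (td.modify x [] (fun l => l ++ [y])).getD b [] ≠ [] := by
            intro b hb
            rw [PySem.Dict.getD_modify]
            split_ifs with he
            · simp
            · rw [PySem.Dict.contains_modify] at hb
              simp [he] at hb
              exact h1 b hb
          have h2' : ∀ b, ((td.modify x [] (fun l => l ++ [y])).getD b []).length ≤ 2 := by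
            intro b
            rw [PySem.Dict.getD_modify]
            split_ifs with he
            · simp only [List.length_append, List.length_cons, List.length_nil]
              omega
            · exact h2 b
          have hih := ih _ h1' h2' a
          rw [List.foldl_cons, hstep]
          refine ⟨?_, ?_⟩
          · rw [hih.1, PySem.Dict.getD_modify, List.filterMap_cons]
            by_cases he : a = x
            · subst he
              simp [List.append_assoc]
            · simp [he, Ne.symm he]
          · rw [hih.2, PySem.Dict.contains_modify, List.filterMap_cons]
            by_cases he : a = x
            · subst he
              simp [hcx]
            · simp [he, Ne.symm he]
        · -- key full: row ignored
          have hstep : buildStep td (x :: y :: t) = td := by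
            unfold buildStep
            rw [h0]
            dsimp only
            rw [if_neg hnone, if_neg hlt]
          have hih := ih td h1 h2 a
          rw [List.foldl_cons, hstep]
          refine ⟨?_, ?_⟩
          · rw [hih.1, List.filterMap_cons]
            by_cases he : a = x
            · subst he
              have hlen : (td.getD a []).length = 2 := by
                have := h2 a
                omega
              simp only [if_pos rfl]
              rw [List.take_append_of_le_length (by omega),
                List.take_append_of_le_length (by omega)]
            · simp [Ne.symm he]
          · rw [hih.2, List.filterMap_cons]
            by_cases he : a = x
            · subst he
              simp [hcx]
            · simp [Ne.symm he]

theorem build_getD (m : List (List Int)) (a : Int) :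
    (buildTreeDict m).getD a [] = kids m a := by
  have h := build_inv m m PySem.Dict.empty
    (by intro a h; simp [PySem.Dict.contains_empty] at h)
    (by intro a; simp [PySem.Dict.getD_empty]) a
  simpa [buildTreeDict, kids, PySem.Dict.getD_empty] using h.1

theorem build_isSome (m : List (List Int)) (a : Int) :
    ((buildTreeDict m).get? a).isSome = !decide (kids m a = []) := by
  have h := (build_inv m m PySem.Dict.empty
    (by intro a h; simp [PySem.Dict.contains_empty] at h)
    (by intro a; simp [PySem.Dict.getD_empty]) a).2
  simp only [PySem.Dict.contains_empty, Bool.false_eq_true, false_or] at h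
  have hk : kids m a = [] ↔ (m.filterMap (fun r =>
      match r with
      | x :: y :: _ => if x = a then some y else none
      | _ => none)) = [] := by
    unfold kids
    rw [List.take_eq_nil_iff]
    simp
  rcases hc : ((buildTreeDict m) : PySem.Dict Int (List Int)).contains a with _ | _
  · have hn : ¬ (buildTreeDict m).contains a = true := by simp [buildTreeDict] at hc ⊢; exact hc
    rw [buildTreeDict] at hn
    have := (not_iff_not.2 h).1 hn
    simp only [ne_eq, not_not] at this
    have hker : kids m a = [] := hk.2 this
    have : (buildTreeDict m).get? a = none :=
      (PySem.Dict.get?_eq_none_iff_contains _ _).2 (by simpa [buildTreeDict] using hc)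
    simp [this, hker]
  · have := h.1 (by simpa [buildTreeDict] using hc)
    have hker : kids m a ≠ [] := fun he => this (hk.1 he)
    have hcc : (buildTreeDict m).get? a ≠ none := by
      intro he
      have := (PySem.Dict.get?_eq_none_iff_contains _ _).1 he
      rw [buildTreeDict] at this
      simp [buildTreeDict] at hc
      rw [hc] at this
      simp at this
    simp [Option.isSome_iff_ne_none.2 hcc, hker]

-- ===== BFS side =====

def maxN (m : List (List Int)) (g : Nat) (l : List Int) : Nat :=
  (l.map (nd m g)).foldl max 0

theorem havechild_eq (m : List (List Int)) (l : List Int) :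
    havechild l (buildTreeDict m) = l.any (fun n => !decide (kids m n = [])) := by
  unfold havechild
  apply PySem.List.any_congr_mem
  intro node _
  rcases hg : (buildTreeDict m).get? node with _ | v
  · have hs := build_isSome m node
    rw [hg] at hs
    simp only [Option.isSome_none] at hs
    have : kids m node = [] := by
      by_contra hne
      simp [hne] at hs
    simp [this]
  · have hs := build_isSome m node
    rw [hg] at hs
    simp only [Option.isSome_some] at hs
    have hne : kids m node ≠ [] := by
      by_contra he
      simp [he] at hs
    have hv : v = kids m node := by
      rw [← build_getD m node]
      exact (PySem.Dict.getD_of_get?_eq_some _ _ hg).symm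
    subst hv
    simp [hne, List.length_pos_iff]

theorem newLayer_eq (m : List (List Int)) (cur : List Int) (acc : List Int) :
    cur.foldl (fun nl node =>
      if ((buildTreeDict m).get? node).isSome then nl ++ (buildTreeDict m).getD node [] else nl) acc
    = acc ++ cur.flatMap (kids m) := by
  have hf : (fun (nl : List Int) (node : Int) =>
      if ((buildTreeDict m).get? node).isSome then nl ++ (buildTreeDict m).getD node [] else nl)
      = (fun nl node => nl ++ kids m node) := by
    funext nl node
    rw [build_isSome, build_getD]
    by_cases h : kids m node = [] <;> simp [h]
  rw [hf, PySem.List.foldl_append_eq_flatMap]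

theorem maxN_kids (m : List (List Int)) (g : Nat) (a : Int)
    (h : bndM m g a = true) : maxN m g (kids m a) = nd m g a - 1 := by
  have := nd_succ_kids m g a h
  unfold maxN
  omega

theorem maxN_cons (m : List (List Int)) (g : Nat) (n : Int) (l : List Int) :
    maxN m g (n :: l) = nd m g n ⊔ maxN m g l := by
  unfold maxN
  simp only [List.map_cons, List.foldl_cons]
  rw [show max 0 (nd m g n) = nd m g n ⊔ 0 by simp, foldl_max_pull]

theorem maxN_append (m : List (List Int)) (g : Nat) (l1 l2 : List Int) :
    maxN m g (l1 ++ l2) = maxN m g l1 ⊔ maxN m g l2 := by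
  induction l1 with
  | nil => simp [maxN]
  | cons x t ih => simp [maxN_cons, ih, max_assoc]

theorem maxN_flatMap (m : List (List Int)) (g : Nat) (cur : List Int)
    (h : ∀ n ∈ cur, bndM m g n = true) :
    maxN m g (cur.flatMap (kids m)) = maxN m g cur - 1 := by
  induction cur with
  | nil => simp [maxN]
  | cons n t ih =>
    have hn := h n (by simp)
    have ht := ih (fun x hx => h x (by simp [hx]))
    rw [List.flatMap_cons, maxN_append, maxN_kids m g n hn, maxN_cons, ht]
    have h1 := nd_pos m g n
    omega

theorem bfsLoop_len (m : List (List Int)) (g : Nat) :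
    ∀ (f : Nat) (st : List (List Int)) (cur : List Int),
      st.getLastD [] = cur → cur ≠ [] →
      (∀ n ∈ cur, bndM m g n = true) →
      maxN m g cur ≤ f + 1 →
      (bfsLoop (buildTreeDict m) f st).length = st.length + (maxN m g cur - 1) := by
  intro f
  induction f with
  | zero =>
    intro st cur hlast hne hb hm
    show st.length = st.length + (maxN m g cur - 1)
    omega
  | succ f ih =>
    intro st cur hlast hne hb hm
    show (if havechild (st.getLastD []) (buildTreeDict m) then _ else st).length = _
    rw [hlast, havechild_eq]
    by_cases hch : cur.any (fun n => !decide (kids m n = [])) = true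
    · rw [if_pos hch]
      rw [newLayer_eq m cur []]
      simp only [List.nil_append]
      rcases List.any_eq_true.1 hch with ⟨n0, hn0, hk0⟩
      have hk0 : kids m n0 ≠ [] := by simpa using hk0
      rcases List.exists_mem_of_ne_nil _ hk0 with ⟨c0, hc0⟩
      have hnext_ne : cur.flatMap (kids m) ≠ [] :=
        List.ne_nil_of_mem (List.mem_flatMap.2 ⟨n0, hn0, hc0⟩)
      have hb' : ∀ n ∈ cur.flatMap (kids m), bndM m g n = true := by
        intro c hc
        rcases List.mem_flatMap.1 hc with ⟨n, hn, hcn⟩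
        exact bndM_child m g n c (hb n hn) hcn
      have hmax2 : 2 ≤ maxN m g cur := by
        have hnd2 : 2 ≤ nd m g n0 := by
          have := nd_succ_kids m g n0 (hb n0 hn0)
          have hmem : nd m g c0 ∈ (kids m n0).map (nd m g) := List.mem_map_of_mem hc0
          have hle := (PySem.List.le_foldl_max ((kids m n0).map (nd m g)) 0).2 _ hmem
          have := nd_pos m g c0
          omega
        have hmem : nd m g n0 ∈ cur.map (nd m g) := List.mem_map_of_mem hn0
        have := (PySem.List.le_foldl_max (cur.map (nd m g)) 0).2 _ hmem
        unfold maxN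
        omega
      have hflat := maxN_flatMap m g cur hb
      rw [ih (st ++ [cur.flatMap (kids m)]) (cur.flatMap (kids m))
        List.getLastD_concat hnext_ne hb' (by rw [hflat]; omega)]
      simp only [List.length_append, List.length_cons, List.length_nil]
      omega
    · rw [if_neg hch]
      have hall : ∀ n ∈ cur, nd m g n = 1 := by
        intro n hn
        have : ¬ (!decide (kids m n = [])) = true := by
          intro hx
          exact hch (List.any_eq_true.2 ⟨n, hn, hx⟩)
        have hknil : kids m n = [] := by simpa using this
        exact nd_of_kids_nil m g n hknil
      have h1 : maxN m g cur = 1 := by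
        rcases List.exists_mem_of_ne_nil _ hne with ⟨n0, hn0⟩
        have hle : maxN m g cur ≤ 1 := by
          apply foldl_max_le
          · omega
          · intro x hx
            rcases List.mem_map.1 hx with ⟨n, hn, rfl⟩
            rw [hall n hn]
        have hmem : nd m g n0 ∈ cur.map (nd m g) := List.mem_map_of_mem hn0
        have hge := (PySem.List.le_foldl_max (cur.map (nd m g)) 0).2 _ hmem
        rw [hall n0 hn0] at hge
        unfold maxN at hle ⊢
        omega
      rw [h1]
      omega

-- ===== DFS side =====

def stackW (m : List (List Int)) (g : Nat) (stack : List (Int × Int)) : Nat :=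
  (stack.map (fun p => 3 ^ (nd m g p.1))).sum

theorem push_eq (cs : List Int) (dep : Int) :
    ∀ rest : List (Int × Int),
      cs.foldl (fun st c => (c, dep + 1) :: st) rest
        = (cs.map (fun c => (c, dep + 1))).reverse ++ rest := by
  induction cs with
  | nil => intro rest; rfl
  | cons c t ih => intro rest; simp [ih]

theorem foldl_max_map_add (l : List Nat) (hl : l ≠ []) (k a : Int) :
    (l.map (fun (x : Nat) => k + (x : Int))).foldl max a = a ⊔ (k + ((l.foldl max 0 : Nat) : Int)) := by
  induction l generalizing a with
  | nil => exact absurd rfl hl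
  | cons x t ih =>
    cases t with
    | nil => simp
    | cons y s =>
      have h2 : (y :: s : List Nat) ≠ [] := by simp
      rw [List.map_cons, List.foldl_cons, ih h2]
      have hx : (x :: y :: s : List Nat).foldl max 0 = x ⊔ (y :: s : List Nat).foldl max 0 := by
        rw [List.foldl_cons, show max 0 x = x ⊔ 0 by simp, foldl_max_pull]
      rw [hx]
      push_cast
      rw [max_assoc]
      congr 1
      rw [← max_add_add_left]

theorem dfsLoop_eq (m : List (List Int)) (g : Nat) :
    ∀ (f : Nat) (stack : List (Int × Int)) (md : Int),
      (∀ p ∈ stack, bndM m g p.1 = true) →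
      stackW m g stack ≤ f →
      dfsLoop (buildTreeDict m) f stack md
        = (stack.map (fun p => p.2 - 1 + (nd m g p.1 : Int))).foldl max md := by
  intro f
  induction f with
  | zero =>
    intro stack md hb hw
    cases stack with
    | nil => rfl
    | cons p rest =>
      exfalso
      have h1 : 1 ≤ 3 ^ (nd m g p.1) := Nat.one_le_pow _ _ (by norm_num)
      unfold stackW at hw
      simp only [List.map_cons, List.sum_cons] at hw
      omega
  | succ f ih =>
    intro stack md hb hw
    cases stack with
    | nil => rfl
    | cons p rest =>
      obtain ⟨node, dep⟩ := p
      have hbn : bndM m g node = true := hb (node, dep) (by simp)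
      have hbr : ∀ p ∈ rest, bndM m g p.1 = true := fun p hp => hb p (by simp [hp])
      have hkb : ∀ c ∈ kids m node, bndM m g c = true := fun c hc => bndM_child m g node c hbn hc
      have hnd := nd_succ_kids m g node hbn
      have hpos := nd_pos m g node
      -- the popped step
      show dfsLoop (buildTreeDict m) f
          (((buildTreeDict m).getD node []).foldl (fun st c => (c, dep + 1) :: st) rest)
          (if dep > md then dep else md) = _
      rw [build_getD, push_eq]
      have hmd : (if dep > md then dep else md) = md ⊔ dep := by
        split_ifs with h
        · exact (max_eq_right h.le).symm
        · exact (max_eq_left (by omega)).symm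
      -- bound the new stack weight
      have hchild_nd : ∀ c ∈ kids m node, nd m g c ≤ nd m g node - 1 := by
        intro c hc
        have hmem : nd m g c ∈ (kids m node).map (nd m g) := List.mem_map_of_mem hc
        have := (PySem.List.le_foldl_max ((kids m node).map (nd m g)) 0).2 _ hmem
        omega
      have hlen : (kids m node).length ≤ 2 := by
        unfold kids; exact List.length_take_le _ _
      have hsum : ((kids m node).map (fun c => 3 ^ (nd m g c))).sum + 1 ≤ 3 ^ (nd m g node) := by
        have hB : ∀ x ∈ (kids m node).map (fun c => 3 ^ (nd m g c)), x ≤ 3 ^ (nd m g node - 1) := by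
          intro x hx
          rcases List.mem_map.1 hx with ⟨c, hc, rfl⟩
          exact Nat.pow_le_pow_right (by norm_num) (hchild_nd c hc)
        have h1 := List.sum_le_card_nsmul _ _ hB
        have h2 : 3 ^ (nd m g node) = 3 * 3 ^ (nd m g node - 1) := by
          conv_lhs => rw [show nd m g node = (nd m g node - 1) + 1 by omega]
          rw [pow_succ]; ring
        have h3 : 1 ≤ 3 ^ (nd m g node - 1) := Nat.one_le_pow _ _ (by norm_num)
        simp only [List.length_map, smul_eq_mul] at h1
        nlinarith [hlen]
      have hw' : stackW m g (((kids m node).map (fun c => (c, dep + 1))).reverse ++ rest) ≤ f := by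
        unfold stackW at hw ⊢
        rw [List.map_append, List.sum_append, List.map_reverse, List.sum_reverse, List.map_map]
        simp only [List.map_cons, List.sum_cons] at hw
        have : ((kids m node).map ((fun p => 3 ^ nd m g p.1) ∘ fun c => (c, dep + 1))).sum
            = ((kids m node).map (fun c => 3 ^ (nd m g c))).sum := by
          rfl
        rw [this]
        omega
      have hb' : ∀ p ∈ ((kids m node).map (fun c => (c, dep + 1))).reverse ++ rest,
          bndM m g p.1 = true := by
        intro p hp
        rcases List.mem_append.1 hp with hp | hp
        · rcases List.mem_map.1 (List.mem_reverse.1 hp) with ⟨c, hc, rfl⟩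
          exact hkb c hc
        · exact hbr p hp
      rw [ih _ _ hb' hw', hmd]
      rw [List.map_append, List.foldl_append, List.map_reverse, foldl_max_reverse, List.map_map]
      have hfn : ((kids m node).map ((fun p => p.2 - 1 + (nd m g p.1 : Int)) ∘ fun c => (c, dep + 1)))
          = ((kids m node).map (nd m g)).map (fun (x : Nat) => dep + (x : Int)) := by
        rw [List.map_map]
        exact List.map_congr_left (fun c _ => by simp only [Function.comp_apply]; ring)
      rw [hfn]
      simp only [List.map_cons, List.foldl_cons]
      by_cases hnil : kids m node = []
      · rw [hnil]
        rw [nd_of_kids_nil m g node hnil]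
        norm_num
      · rw [foldl_max_map_add _ (by simpa using hnil)]
        have hM : (nd m g node : Int) = 1 + (((kids m node).map (nd m g)).foldl max 0 : Nat) := by
          exact_mod_cast hnd
        congr 1
        rw [hM]
        have h0 : (0 : Int) ≤ (((kids m node).map (nd m g)).foldl max 0 : Nat) := by positivity
        rw [max_assoc]
        have : dep ⊔ (dep + (((kids m node).map (nd m g)).foldl max 0 : Nat))
            = dep + (((kids m node).map (nd m g)).foldl max 0 : Nat) := max_eq_right (by omega)
        rw [this]
        ring_nf
      

-- ===== main theorem =====

theorem height_eq_nd (m : List (List Int)) (h : bndM m m.length 0 = true) :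
    height_tree m = (nd m m.length 0 : Int) := by
  unfold height_tree
  have hmax : maxN m m.length [0] = nd m m.length 0 := by
    unfold maxN
    simp
  have hle := nd_le m m.length 0 h
  have hpos := nd_pos m m.length 0
  rw [bfsLoop_len m m.length (m.length + 2) [[0]] [0] rfl (by simp)
    (by intro n hn; simp at hn; subst hn; exact h) (by rw [hmax]; omega)]
  rw [hmax]
  simp only [List.length_cons, List.length_nil]
  push_cast
  omega

theorem height_alt_eq_nd (m : List (List Int)) (h : bndM m m.length 0 = true) :
    height_tree_alt m = (nd m m.length 0 : Int) := by
  unfold height_tree_alt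
  have hle := nd_le m m.length 0 h
  have hpos := nd_pos m m.length 0
  rw [dfsLoop_eq m m.length (4 ^ (m.length + 2)) [(0, 1)] 0
    (by intro p hp; simp at hp; rw [hp]; exact h)
    (by
      unfold stackW
      simp only [List.map_cons, List.map_nil, List.sum_cons, List.sum_nil, Nat.add_zero]
      calc 3 ^ (nd m m.length 0) ≤ 4 ^ (nd m m.length 0) :=
              Nat.pow_le_pow_left (by norm_num) _
        _ ≤ 4 ^ (m.length + 2) := Nat.pow_le_pow_right (by norm_num) (by omega))]
  simp

-- ===== VERDICT (by name: the statement is the Claim_ definition above) =====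
theorem height_tree_spec : Claim_equal_height_tree := by
  intro m _ hpre
  unfold Spec_height_tree
  rw [height_eq_nd m hpre.2, height_alt_eq_nd m hpre.2]
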